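-- pv_equiv track=rewrite | github.com/hvox/algebra | compression_algorithms.py | shrink_encoding
-- ===== SOURCE A (Python) =====
-- Encoding = list[tuple[int, ...]]
--
-- def shrink_encoding(encoding: Encoding) -> Encoding:
--     trie, paths = {}, []
--     for code in encoding:
--         node, path = trie, []
--         for char in code:
--             node.setdefault(char, [0, {}])[0] += 1
--             path.append(node[char])
--             node = node[char][1]
--         paths.append(path)
--     for i, code in enumerate(encoding):
--         path = paths[i]
--         while len(path) > 2 and path[~1][0] == 1:
--             path.pop()
--         encoding[i] = code[:len(path)]
--     return encoding
-- ===== SOURCE B (Python) =====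
-- def _lcp(a, b):
--     n = 0
--     for x, y in zip(a, b):
--         if x != y:
--             break
--         n += 1
--     return n
--
-- def shrink_encoding(encoding):
--     # sliced prefixes via pairwise longest-common-prefix instead of a counting trie
--     codes = list(encoding)
--     for i, code in enumerate(codes):
--         others = codes[:i] + codes[i + 1:]
--         best = max((_lcp(code, o) for o in others), default=0)
--         encoding[i] = code[:max(2, best + 1)]
--     return encoding
-- ===== Notes on version B (the rewrite author's own statement) =====
-- stated objective: simpler
-- what changed: Replaces the mutable counting trie (nested dicts with per-node counters and stored node paths, then a pop-while loop) by a direct pairwise longest-common-prefix scan: each code is cut to max(2, 1 + max lcp with any other code), capped by its length.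
import Mathlib
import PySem

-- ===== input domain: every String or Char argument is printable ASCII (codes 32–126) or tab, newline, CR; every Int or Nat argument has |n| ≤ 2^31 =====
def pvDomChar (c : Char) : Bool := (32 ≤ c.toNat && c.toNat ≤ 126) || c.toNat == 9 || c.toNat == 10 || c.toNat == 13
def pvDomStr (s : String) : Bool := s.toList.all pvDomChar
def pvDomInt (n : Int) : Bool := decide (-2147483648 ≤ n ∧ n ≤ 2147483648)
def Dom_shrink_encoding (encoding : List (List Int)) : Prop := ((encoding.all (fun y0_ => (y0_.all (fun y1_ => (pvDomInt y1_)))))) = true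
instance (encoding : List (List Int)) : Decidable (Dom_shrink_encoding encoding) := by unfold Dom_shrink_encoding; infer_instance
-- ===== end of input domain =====

-- B replaces A's counting trie by a pairwise longest-common-prefix scan (same return values;
-- the Python A mutates and returns the input list in place — and so does the Python B — so the
-- statement proved here is about the returned list).

-- ===== PORT A =====
-- A's trie is a nest of mutable dicts; a nested dict-trie is not expressible here, so each trie
-- node is addressed by its path from the root (the nonempty prefix of the code leading to it):
-- the inner 'for char in code' walk incrementing per-node counters becomes a fold over the
-- nonempty prefixes of the code, incrementing the same counters in the same order; paths[i] is
-- recovered as the prefixes of encoding[i], whose stored nodes carry the final counters.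
def pvPrefixes (code : List Int) : List (List Int) :=
  (List.range code.length).map (fun j => code.take (j + 1))

def pvTrieCounts (encoding : List (List Int)) : PySem.Dict (List Int) Int :=
  encoding.foldl
    (fun d code => (pvPrefixes code).foldl (fun d p => d.modify p 0 (· + 1)) d)
    PySem.Dict.empty

-- the 'while len(path) > 2 and path[~1][0] == 1: path.pop()' loop; path[~1] is the node of
-- the prefix of length (current length - 1)
def pvTrim (cnt : PySem.Dict (List Int) Int) (code : List Int) : Nat → Nat
  | 0 => 0
  | L + 1 => if L + 1 > 2 ∧ cnt.getD (code.take L) 0 = 1 then pvTrim cnt code L else L + 1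

def shrink_encoding (encoding : List (List Int)) : List (List Int) :=
  let cnt := pvTrieCounts encoding
  encoding.map (fun code => code.take (pvTrim cnt code code.length))

-- ===== PORT B =====
def pvLcp : List Int → List Int → Nat
  | a :: as, b :: bs => if a = b then pvLcp as bs + 1 else 0
  | _, _ => 0

def shrink_encoding_alt (encoding : List (List Int)) : List (List Int) :=
  encoding.zipIdx.map (fun ci =>
    let others := encoding.take ci.2 ++ encoding.drop (ci.2 + 1)
    let best := (others.map (pvLcp ci.1)).foldl max 0
    ci.1.take (max 2 (best + 1)))

-- ===== PRECONDITION & SPEC =====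
def Spec_shrink_encoding (encoding : List (List Int)) (out : List (List Int)) : Prop := out = shrink_encoding_alt encoding
instance (encoding : List (List Int)) (out : List (List Int)) : Decidable (Spec_shrink_encoding encoding out) := by unfold Spec_shrink_encoding; infer_instance

-- ===== CLAIM (what is proved, stated in full; the proofs are below) =====
def Claim_equal_shrink_encoding : Prop := ∀ (encoding : List (List Int)), Dom_shrink_encoding encoding → Spec_shrink_encoding encoding (shrink_encoding encoding)

-- ===== LEMMAS AND PROOFS =====

lemma mem_pvPrefixes {p code : List Int} : p ∈ pvPrefixes code ↔ p ≠ [] ∧ p <+: code := by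
  unfold pvPrefixes
  simp only [List.mem_map, List.mem_range]
  constructor
  · rintro ⟨j, hj, rfl⟩
    refine ⟨?_, List.take_prefix _ _⟩
    have : (code.take (j+1)).length = j+1 := by
      rw [List.length_take]; omega
    intro h; rw [h] at this; simp at this
  · rintro ⟨hne, hp⟩
    refine ⟨p.length - 1, ?_, ?_⟩
    · have := hp.length_le
      have : 1 ≤ p.length := by
        cases p with
        | nil => simp at hne
        | cons a as => simp
      omega
    · have h1 : 1 ≤ p.length := by
        cases p with
        | nil => simp at hne
        | cons a as => simp
      have heq := List.prefix_iff_eq_take.mp hp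
      rw [show p.length - 1 + 1 = p.length from by omega]
      exact heq.symm

lemma nodup_pvPrefixes (code : List Int) : (pvPrefixes code).Nodup := by
  unfold pvPrefixes
  apply List.Nodup.map_on _ (List.nodup_range)
  intro x hx y hy hxy
  simp only [List.mem_range] at hx hy
  have hxl : (code.take (x+1)).length = x+1 := by rw [List.length_take]; omega
  have hyl : (code.take (y+1)).length = y+1 := by rw [List.length_take]; omega
  rw [hxy] at hxl; rw [hyl] at hxl; omega

lemma count_pvPrefixes (p code : List Int) :
    (pvPrefixes code).count p = if p ≠ [] ∧ p <+: code then 1 else 0 := by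
  by_cases h : p ≠ [] ∧ p <+: code
  · rw [if_pos h]
    exact List.count_eq_one_of_mem (nodup_pvPrefixes code) (mem_pvPrefixes.mpr h)
  · rw [if_neg h]
    exact List.count_eq_zero_of_not_mem (fun hm => h (mem_pvPrefixes.mp hm))

lemma getD_trieCounts_aux (l : List (List Int)) (p : List Int) :
    ∀ d : PySem.Dict (List Int) Int,
      (l.foldl (fun d code => (pvPrefixes code).foldl (fun d p => d.modify p 0 (· + 1)) d) d).getD p 0
        = d.getD p 0 + (l.countP (fun c => decide (p ≠ [] ∧ p <+: c)) : Int) := by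
  induction l with
  | nil => intro d; simp
  | cons c t ih =>
    intro d
    rw [List.foldl_cons, ih, PySem.Dict.getD_foldl_modify_add_one, count_pvPrefixes,
        List.countP_cons]
    by_cases h : p ≠ [] ∧ p <+: c
    · rw [if_pos h]; simp [h]; ring
    · rw [if_neg h]; simp [h]

lemma getD_trieCounts (l : List (List Int)) (p : List Int) :
    (pvTrieCounts l).getD p 0 = (l.countP (fun c => decide (p ≠ [] ∧ p <+: c)) : Int) := by
  unfold pvTrieCounts
  rw [getD_trieCounts_aux]
  simp

lemma take_prefix_iff_lcp (c o : List Int) (L : Nat) (hL : L ≤ c.length) :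
    c.take L <+: o ↔ L ≤ pvLcp c o := by
  induction c generalizing o L with
  | nil =>
    simp at hL; subst hL; simp
  | cons a as ih =>
    cases L with
    | zero => simp
    | succ L =>
      cases o with
      | nil => simp [pvLcp]
      | cons b bs =>
        simp only [List.take_succ_cons, List.cons_prefix_cons, pvLcp]
        rw [ih bs L (by simpa using Nat.le_of_succ_le_succ hL)]
        by_cases hab : a = b
        · simp [hab]
        · simp [hab]

lemma foldl_max_lt (xs : List Nat) (a L : Nat) :
    xs.foldl max a < L ↔ a < L ∧ ∀ x ∈ xs, x < L := by
  induction xs generalizing a with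
  | nil => simp
  | cons x t ih =>
    rw [List.foldl_cons, ih]
    simp only [Nat.max_lt, List.mem_cons]
    constructor
    · rintro ⟨⟨h1, h2⟩, h3⟩
      exact ⟨h1, fun y hy => by rcases hy with rfl | hy; exact h2; exact h3 y hy⟩
    · rintro ⟨h1, h2⟩
      exact ⟨⟨h1, h2 x (Or.inl rfl)⟩, fun y hy => h2 y (Or.inr hy)⟩

lemma pvTrim_eq_min (cnt : PySem.Dict (List Int) Int) (code : List Int) (best : Nat)
    (hchar : ∀ L, 1 ≤ L → L ≤ code.length →
      (cnt.getD (code.take L) 0 = 1 ↔ best < L)) :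
    ∀ L, L ≤ code.length → pvTrim cnt code L = min L (max 2 (best + 1)) := by
  intro L
  induction L with
  | zero => intro _; simp [pvTrim]
  | succ L ih =>
    intro hL
    rw [pvTrim]
    by_cases hc : L + 1 > 2 ∧ cnt.getD (code.take L) 0 = 1
    · have h1 : 1 ≤ L := by omega
      have h2 : L ≤ code.length := by omega
      have hb : best < L := (hchar L h1 h2).mp hc.2
      rw [if_pos hc, ih (by omega)]
      omega
    · rw [if_neg hc]
      by_cases h3 : L + 1 > 2
      · have h1 : 1 ≤ L := by omega
        have h2 : L ≤ code.length := by omega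
        have : ¬ best < L := fun hb => hc ⟨h3, (hchar L h1 h2).mpr hb⟩
        omega
      · omega

lemma shrink_encoding_eq_alt : ∀ (encoding : List (List Int)),
    shrink_encoding encoding = shrink_encoding_alt encoding := by
  intro encoding
  unfold shrink_encoding shrink_encoding_alt
  apply List.ext_getElem
  · simp
  · intro i h1 h2
    simp only [List.getElem_map, List.getElem_zipIdx, Nat.zero_add]
    set code := encoding[i]'(by simpa using h1) with hcode
    set others := encoding.take i ++ encoding.drop (i + 1) with hothers
    set best := (others.map (pvLcp code)).foldl max 0 with hbest
    have hi : i < encoding.length := by simpa using h1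
    have hchar : ∀ L, 1 ≤ L → L ≤ code.length →
        ((pvTrieCounts encoding).getD (code.take L) 0 = 1 ↔ best < L) := by
      intro L hL1 hL2
      rw [getD_trieCounts]
      have hne : code.take L ≠ [] := by
        intro h
        have := congrArg List.length h
        simp only [List.length_take, List.length_nil] at this
        omega
      have hsplit : encoding.countP (fun c => decide (code.take L ≠ [] ∧ code.take L <+: c))
          = (others.countP (fun c => decide (code.take L ≠ [] ∧ code.take L <+: c))) + 1 := by
        conv_lhs => rw [← List.take_append_drop i encoding]
        rw [← List.getElem_cons_drop hi, hothers]
        rw [List.countP_append, List.countP_cons, List.countP_append]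
        split_ifs with hif
        · ring
        · exfalso
          apply hif
          simp only [decide_eq_true_eq]
          exact ⟨hne, hcode ▸ List.take_prefix L code⟩
      rw [hsplit]
      constructor
      · intro hone
        have hzero : others.countP (fun c => decide (code.take L ≠ [] ∧ code.take L <+: c)) = 0 := by
          have := hone
          push_cast at this
          omega
        rw [List.countP_eq_zero] at hzero
        rw [hbest, foldl_max_lt]
        refine ⟨hL1, ?_⟩
        intro x hx
        rw [List.mem_map] at hx
        obtain ⟨o, ho, rfl⟩ := hx
        have := hzero o ho
        simp only [decide_eq_true_eq] at this
        have hnp : ¬ code.take L <+: o := fun hp => this ⟨hne, hp⟩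
        rw [take_prefix_iff_lcp code o L hL2] at hnp
        omega
      · intro hb
        have hzero : others.countP (fun c => decide (code.take L ≠ [] ∧ code.take L <+: c)) = 0 := by
          rw [List.countP_eq_zero]
          intro o ho
          simp only [decide_eq_true_eq]
          rintro ⟨-, hp⟩
          rw [take_prefix_iff_lcp code o L hL2] at hp
          rw [hbest, foldl_max_lt] at hb
          have := hb.2 (pvLcp code o) (List.mem_map_of_mem ho)
          omega
        rw [hzero]
        norm_num
    rw [pvTrim_eq_min _ _ best hchar code.length (le_refl _)]
    rw [min_comm, ← List.take_take, List.take_length]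

-- ===== VERDICT (by name: the statement is the Claim_ definition above) =====
theorem shrink_encoding_spec : Claim_equal_shrink_encoding := by
  intro encoding _
  unfold Spec_shrink_encoding
  exact shrink_encoding_eq_alt encoding
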